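-- pv_equiv track=rewrite | github.com/holmes1313/Leetcode | array_and_string/REVIEW/medium/@1209. Remove All Adjacent Duplicates in String II.py | removeDuplicates_at_least_k
-- ===== SOURCE A (Python) =====
-- def removeDuplicates_at_least_k(s, k):
--     """
--     :type s: str
--     :type k: int
--     :rtype: str
--     """
--     stack = []
--     i = 0
--     while i < len(s):
--         if stack and s[i] == stack[-1][0]:
--             stack[-1][1] += 1
--             i += 1
--         else:
--             if stack and stack[-1][1] >= k:
--                 stack.pop()
--                 continue
--             else:
--                 stack.append([s[i], 1])
--                 i += 1
--     if stack and stack[-1][1] >= k: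
--         stack.pop()
--     return "".join(char * count for char, count in stack)
-- ===== SOURCE B (Python) =====
-- def removeDuplicates_at_least_k(s, k):
--     # Repeated-scan rewriting: delete the leftmost maximal run of length >= k,
--     # restart from the beginning, until the string is stable.
--     while True:
--         deleted = False
--         i = 0
--         while i < len(s):
--             j = i
--             while j < len(s) and s[j] == s[i]:
--                 j += 1
--             if j - i >= k:
--                 s = s[:i] + s[j:]
--                 deleted = True
--                 break
--             i = j
--         if not deleted:
--             return s
-- ===== Notes on version B (the rewrite author's own statement) =====
-- stated objective: alternative
-- what changed: Replaces A's single-pass counting stack (with pop-and-merge on the fly) by a repeated-scan rewriter that finds the leftmost maximal run of length >= k, deletes it, and restarts from the beginning until the string is stable.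
import Mathlib
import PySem

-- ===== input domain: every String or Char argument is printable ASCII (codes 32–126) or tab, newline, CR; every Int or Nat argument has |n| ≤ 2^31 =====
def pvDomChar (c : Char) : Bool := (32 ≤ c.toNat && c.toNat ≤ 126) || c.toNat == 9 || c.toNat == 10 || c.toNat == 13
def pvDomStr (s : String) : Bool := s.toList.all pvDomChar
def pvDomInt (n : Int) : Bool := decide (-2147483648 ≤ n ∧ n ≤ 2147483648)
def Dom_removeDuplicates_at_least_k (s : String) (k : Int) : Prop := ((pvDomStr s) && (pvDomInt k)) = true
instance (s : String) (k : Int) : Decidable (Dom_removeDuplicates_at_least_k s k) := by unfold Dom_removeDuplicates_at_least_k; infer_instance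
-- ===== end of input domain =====

-- B replaces A's one-pass counting stack by a repeated-scan rewriter that deletes the
-- leftmost maximal run of length ≥ k and restarts until stable (objective: alternative).

-- ===== PORT A =====
-- "".join(char * count for char, count in stack); the stack is kept head = top here,
-- so the Python left-to-right join is the join of the reversed list.
def pvAJoin (stack : List (Char × Int)) : List Char :=
  stack.reverse.flatMap (fun p => List.replicate p.2.toNat p.1)

-- the while-loop of A: state = (stack, remaining characters); `continue` = the pop branch
def pvALoop (k : Int) : List (Char × Int) → List Char → List (Char × Int)
  | stack, [] => stack
  | stack, c :: rest =>
    match stack with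
    | (c0, n0) :: tl =>
      if c == c0 then pvALoop k ((c0, n0 + 1) :: tl) rest
      else if n0 ≥ k then pvALoop k tl (c :: rest)
      else pvALoop k ((c, 1) :: (c0, n0) :: tl) rest
    | [] => pvALoop k [(c, 1)] rest
  termination_by stack l => (l.length, stack.length)

def removeDuplicates_at_least_k (s : String) (k : Int) : String :=
  let st := pvALoop k [] s.toList
  let st2 := match st with
    | (c0, n0) :: tl => if n0 ≥ k then tl else (c0, n0) :: tl
    | [] => []
  String.mk (pvAJoin st2)

-- ===== PORT B =====
-- one left-to-right scan: delete the leftmost maximal run of length ≥ k (none = no such run)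
def pvBStep (k : Int) : List Char → Option (List Char)
  | c :: rest =>
    let run := rest.takeWhile (· == c)
    let tail := rest.dropWhile (· == c)
    if (1 + run.length : Int) ≥ k then some tail
    else (pvBStep k tail).map (fun t => c :: (run ++ t))
  | [] => none
  termination_by l => l.length
  decreasing_by
    simpa using Nat.lt_succ_of_le (List.length_dropWhile_le _ _)

theorem pvBStep_length {k : Int} : ∀ {l l' : List Char}, pvBStep k l = some l' → l'.length < l.length := by
  intro l
  induction l using pvBStep.induct (k := k) with
  | case3 => intro l' h; simp [pvBStep] at h
  | case1 c rest run =>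
    rename_i hge
    intro l' h
    rw [pvBStep, if_pos hge] at h
    cases h
    calc (rest.dropWhile (· == c)).length ≤ rest.length := List.length_dropWhile_le _ _
      _ < (c :: rest).length := by simp
  | case2 c rest run tail =>
    rename_i hlt ih
    intro l' h
    rw [pvBStep, if_neg hlt] at h
    rw [Option.map_eq_some_iff] at h
    obtain ⟨t, ht, rfl⟩ := h
    have h1 : t.length < (rest.dropWhile (· == c)).length := ih ht
    have h2 : (rest.takeWhile (· == c)).length + (rest.dropWhile (· == c)).length = rest.length := by
      rw [← List.length_append, List.takeWhile_append_dropWhile]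
    simp only [List.length_cons, List.length_append]
    omega

-- keep deleting until no run of length ≥ k remains
def pvBLoop (k : Int) (l : List Char) : List Char :=
  match h : pvBStep k l with
  | none => l
  | some l' => pvBLoop k l'
  termination_by l.length
  decreasing_by exact pvBStep_length h

def removeDuplicates_at_least_k_alt (s : String) (k : Int) : String :=
  String.mk (pvBLoop k s.toList)

-- ===== PRECONDITION & SPEC =====
def Spec_removeDuplicates_at_least_k (s : String) (k : Int) (out : String) : Prop := out = removeDuplicates_at_least_k_alt s k
instance (s : String) (k : Int) (out : String) : Decidable (Spec_removeDuplicates_at_least_k s k out) := by unfold Spec_removeDuplicates_at_least_k; infer_instance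

-- ===== CLAIM (what is proved, stated in full; the proofs are below) =====
def Claim_equal_removeDuplicates_at_least_k : Prop := ∀ (s : String) (k : Int), Dom_removeDuplicates_at_least_k s k → Spec_removeDuplicates_at_least_k s k (removeDuplicates_at_least_k s k)

-- ===== LEMMAS AND PROOFS =====

-- A's full result from an intermediate state: run the loop, final pop, join
def pvAFin (k : Int) (st : List (Char × Int)) (l : List Char) : List Char :=
  pvAJoin (match pvALoop k st l with
    | (c0, n0) :: tl => if n0 ≥ k then tl else (c0, n0) :: tl
    | [] => [])

theorem pvAJoin_cons (c : Char) (n : Int) (st : List (Char × Int)) :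
    pvAJoin ((c, n) :: st) = pvAJoin st ++ List.replicate n.toNat c := by
  simp [pvAJoin]

theorem pvAbsorb (k : Int) (c : Char) (st : List (Char × Int)) :
    ∀ (n : ℕ) (m : Int) (rest : List Char),
      pvALoop k ((c, m) :: st) (List.replicate n c ++ rest) =
      pvALoop k ((c, m + n) :: st) rest := by
  intro n
  induction n with
  | zero => intro m rest; simp
  | succ n ih =>
    intro m rest
    rw [List.replicate_succ, List.cons_append, pvALoop]
    simp only [beq_self_eq_true, if_pos]
    rw [ih]
    have hmn : m + 1 + (n : Int) = m + ((n + 1 : ℕ) : Int) := by push_cast; ring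
    rw [hmn]

theorem pvPush (k : Int) (c : Char) (rest : List Char) :
    ∀ (st : List (Char × Int)), (∀ p ∈ st, p.2 < k) →
      (∀ c0 n0 tl, st = (c0, n0) :: tl → c ≠ c0) →
      pvALoop k st (c :: rest) = pvALoop k ((c, 1) :: st) rest := by
  intro st hwf hsep
  cases st with
  | nil => rw [pvALoop]
  | cons p tl =>
    obtain ⟨c0, n0⟩ := p
    have hne : c ≠ c0 := hsep c0 n0 tl rfl
    have hlt : n0 < k := hwf (c0, n0) (by simp)
    rw [pvALoop]
    simp [hne, not_le.mpr hlt]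

-- takeWhile (· == c) is a replicate of c
theorem pvTakeWhile_replicate (c : Char) (rest : List Char) :
    rest.takeWhile (· == c) = List.replicate (rest.takeWhile (· == c)).length c := by
  apply List.eq_replicate_of_mem
  intro b hb
  have hb' : (b == c) = true := List.mem_takeWhile_imp (p := fun x => x == c) (l := rest) hb
  exact eq_of_beq hb'

-- processing the head run from a clean stack pushes one counter for the whole run
theorem pvRunLoop (k : Int) (c : Char) (rest : List Char) (st : List (Char × Int))
    (hwf : ∀ p ∈ st, p.2 < k)
    (hsep : ∀ c0 n0 tl, st = (c0, n0) :: tl → c ≠ c0) :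
    ∀ u : List Char,
      pvALoop k st (c :: (rest.takeWhile (· == c) ++ u)) =
      pvALoop k ((c, ((1 + (rest.takeWhile (· == c)).length : ℕ) : Int)) :: st) u := by
  intro u
  rw [pvPush k c _ st hwf hsep]
  conv_lhs => rw [pvTakeWhile_replicate c rest]
  rw [pvAbsorb]
  have h1 : (1 : Int) + ((rest.takeWhile (· == c)).length : Int) =
      (((1 + (rest.takeWhile (· == c)).length : ℕ)) : Int) := by push_cast; ring
  rw [h1]

-- the main simulation: from any state whose stack counts are all < k and whose top
-- character differs from the next input character, A's final result is unchanged by one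
-- B-deletion, and equals stack ++ l when B finds nothing to delete
theorem pvMain (k : Int) : ∀ (l : List Char) (st : List (Char × Int)),
    (∀ p ∈ st, p.2 < k) →
    (∀ c0 n0 tl, st = (c0, n0) :: tl → ∀ c rest, l = c :: rest → c ≠ c0) →
    (∀ l', pvBStep k l = some l' → pvAFin k st l = pvAFin k st l') ∧
    (pvBStep k l = none → pvAFin k st l = pvAJoin st ++ l) := by
  intro l
  induction l using pvBStep.induct (k := k) with
  | case3 =>
    intro st hwf _
    refine ⟨by intro l' h; simp [pvBStep] at h, ?_⟩
    intro _
    cases st with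
    | nil => simp [pvAFin, pvALoop, pvAJoin]
    | cons p tl =>
      obtain ⟨c0, n0⟩ := p
      have hlt : n0 < k := hwf (c0, n0) (by simp)
      simp [pvAFin, pvALoop, not_le.mpr hlt]
  | case1 c rest run =>
    rename_i hge
    -- the leftmost run of length ≥ k is at the front: B deletes it, A pops it
    intro st hwf hsep
    have hsep' : ∀ c0 n0 tl, st = (c0, n0) :: tl → c ≠ c0 :=
      fun c0 n0 tl h => hsep c0 n0 tl h c rest rfl
    have hN : (((1 + (rest.takeWhile (· == c)).length : ℕ)) : Int) ≥ k := by
      exact_mod_cast hge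
    have hN' : k ≤ 1 + ((rest.takeWhile (· == c)).length : Int) := by
      exact_mod_cast hN
    have hloop : pvALoop k st (c :: rest) =
        pvALoop k ((c, ((1 + (rest.takeWhile (· == c)).length : ℕ) : Int)) :: st)
          (rest.dropWhile (· == c)) := by
      conv_lhs => rw [show rest = rest.takeWhile (· == c) ++ rest.dropWhile (· == c) from
        (List.takeWhile_append_dropWhile).symm]
      exact pvRunLoop k c rest st hwf hsep' _
    constructor
    · intro l' h
      rw [pvBStep, if_pos hge] at h
      cases h
      cases htail : rest.dropWhile (· == c) with
      | nil =>
        unfold pvAFin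
        rw [hloop, htail, pvALoop]
        cases st with
        | nil => simp [pvALoop, hN']
        | cons p tl =>
          obtain ⟨c0, n0⟩ := p
          have hlt : n0 < k := hwf (c0, n0) (by simp)
          rw [pvALoop]
          simp [hN', not_le.mpr hlt]
      | cons d t'' =>
        have hd : ¬ (d == c) = true := by
          have := List.head_dropWhile_not (fun x => x == c) (l := rest) (by rw [htail]; simp)
          simp [htail] at this
          simp [this]
        unfold pvAFin
        rw [hloop, htail, pvALoop]
        simp [hd, hN']
    · intro h
      rw [pvBStep, if_pos hge] at h
      exact absurd h (by simp)
  | case2 c rest run tail =>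
    rename_i hlt ih
    intro st hwf hsep
    have hsep' : ∀ c0 n0 tl, st = (c0, n0) :: tl → c ≠ c0 :=
      fun c0 n0 tl h => hsep c0 n0 tl h c rest rfl
    have hNlt : (((1 + (rest.takeWhile (· == c)).length : ℕ)) : Int) < k := by
      have h1 : ¬ ((1 + ((rest.takeWhile (· == c)).length : Int)) ≥ k) := hlt
      push_cast
      omega
    have hwf' : ∀ p ∈ ((c, (((1 + (rest.takeWhile (· == c)).length : ℕ)) : Int)) :: st), p.2 < k := by
      intro p hp
      rcases List.mem_cons.mp hp with h | h
      · subst h; exact hNlt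
      · exact hwf p h
    have hsep'' : ∀ c0 n0 tl,
        ((c, (((1 + (rest.takeWhile (· == c)).length : ℕ)) : Int)) :: st) = (c0, n0) :: tl →
        ∀ d t'', rest.dropWhile (· == c) = d :: t'' → d ≠ c0 := by
      intro c0 n0 tl h d t'' hdt
      have hcc : c0 = c := by
        injection h with h1 _
        exact (congrArg Prod.fst h1).symm
      rw [hcc]
      have hne : rest.dropWhile (· == c) ≠ [] := by rw [hdt]; simp
      have h3 := List.head_dropWhile_not (fun x => x == c) (l := rest) hne
      simp only [hdt, List.head_cons] at h3
      simpa using h3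
    have IH := ih ((c, (((1 + (rest.takeWhile (· == c)).length : ℕ)) : Int)) :: st) hwf' hsep''
    have step1 : pvAFin k st (c :: rest) =
        pvAFin k ((c, (((1 + (rest.takeWhile (· == c)).length : ℕ)) : Int)) :: st)
          (rest.dropWhile (· == c)) := by
      unfold pvAFin
      conv_lhs => rw [show rest = rest.takeWhile (· == c) ++ rest.dropWhile (· == c) from
        (List.takeWhile_append_dropWhile).symm]
      rw [pvRunLoop k c rest st hwf hsep']
    constructor
    · intro l' h
      rw [pvBStep, if_neg hlt] at h
      rw [Option.map_eq_some_iff] at h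
      obtain ⟨t, ht, rfl⟩ := h
      have step2 : pvAFin k st (c :: (rest.takeWhile (· == c) ++ t)) =
          pvAFin k ((c, (((1 + (rest.takeWhile (· == c)).length : ℕ)) : Int)) :: st) t := by
        unfold pvAFin
        rw [pvRunLoop k c rest st hwf hsep']
      rw [step1, step2, IH.1 t ht]
    · intro h
      rw [pvBStep, if_neg hlt] at h
      rw [Option.map_eq_none_iff] at h
      rw [step1, IH.2 h, pvAJoin_cons, List.append_assoc]
      have hrep : List.replicate ((((1 + (rest.takeWhile (· == c)).length : ℕ)) : Int)).toNat c ++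
          rest.dropWhile (· == c) = c :: rest := by
        have htn : ((((1 + (rest.takeWhile (· == c)).length : ℕ)) : Int)).toNat =
            1 + (rest.takeWhile (· == c)).length := Int.toNat_natCast _
        rw [htn, List.replicate_add, List.replicate_one, ← pvTakeWhile_replicate]
        simp [List.takeWhile_append_dropWhile]
      rw [hrep]

theorem pvEquiv (k : Int) : ∀ (l : List Char), pvAFin k [] l = pvBLoop k l := by
  intro l
  induction l using pvBLoop.induct (k := k) with
  | case1 l h =>
    rw [pvBLoop]
    rw [h]
    have := (pvMain k l [] (by simp) (by intro c0 n0 tl h'; simp at h')).2 h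
    simpa [pvAJoin] using this
  | case2 l l' h ih =>
    rw [pvBLoop]
    rw [h]
    exact ((pvMain k l [] (by simp) (by intro c0 n0 tl h'; simp at h')).1 l' h).trans ih

-- ===== VERDICT (by name: the statement is the Claim_ definition above) =====
theorem removeDuplicates_at_least_k_spec : Claim_equal_removeDuplicates_at_least_k := by
  intro s k _
  unfold Spec_removeDuplicates_at_least_k removeDuplicates_at_least_k removeDuplicates_at_least_k_alt
  rw [← pvEquiv k s.toList]
  rfl
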